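-- pv_equiv track=rewrite | github.com/rawmnr/ar-stitching | src/stitching/editable/_legacy_basis.py | _iso_pairs
-- ===== SOURCE A (Python) =====
-- def _iso_pairs(num_terms: int) -> list[tuple[int, int]]:
--     """Enumerate ISO/legacy Zernike (n, m) pairs."""
--
--     pairs: list[tuple[int, int]] = []
--     no = 0
--     while len(pairs) < num_terms:
--         for n in range(no // 2, no + 1):
--             m = no - n
--             pairs.append((n, m))
--             if len(pairs) == num_terms:
--                 break
--             if m != 0:
--                 pairs.append((n, -m))
--                 if len(pairs) == num_terms:
--                     break
--         no += 2
--     return pairs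
-- ===== SOURCE B (Python) =====
-- def _iso_pairs(num_terms: int) -> list[tuple[int, int]]:
--     """Enumerate ISO/legacy Zernike (n, m) pairs."""
--
--     pairs: list[tuple[int, int]] = []
--     K = 0
--     base = 0  # base == K*K, the flat index where the current group starts
--     for i in range(num_terms):
--         if i - base == 2 * K + 1:  # first index of the next group
--             K += 1
--             base = i
--         r = i - base
--         j = r // 2
--         if r % 2 == 0:
--             pairs.append((K + j, K - j))
--         else:
--             pairs.append((K + j, -(K - j)))
--     return pairs
-- ===== Notes on version B (the rewrite author's own statement) =====
-- stated objective: simpler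
-- what changed: Replaced the nested while/for loop with break-counting by a single pass over range(num_terms) that derives each (n,m) pair directly from the flat index via an incrementally maintained group index K with K*K as the group's starting offset.
import Mathlib
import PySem

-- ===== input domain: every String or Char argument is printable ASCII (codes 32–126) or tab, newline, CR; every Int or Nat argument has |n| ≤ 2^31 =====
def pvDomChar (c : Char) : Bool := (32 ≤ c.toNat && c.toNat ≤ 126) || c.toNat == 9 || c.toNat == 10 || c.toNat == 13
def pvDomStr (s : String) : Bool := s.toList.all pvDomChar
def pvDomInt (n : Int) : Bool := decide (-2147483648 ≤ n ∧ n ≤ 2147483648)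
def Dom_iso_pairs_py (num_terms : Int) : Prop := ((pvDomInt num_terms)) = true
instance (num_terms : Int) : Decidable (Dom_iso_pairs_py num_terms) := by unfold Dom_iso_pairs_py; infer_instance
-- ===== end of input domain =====

-- B replaces A's nested while/for loop with break-counting by one pass over range(num_terms),
-- deriving each pair from its flat index via an incrementally maintained group index (simpler).

-- ===== PORT A =====
-- inner `for n in range(no // 2, no + 1)` loop; Bool = whether `break` fired
def aInner (T no : Int) : List Int → List (Int × Int) → List (Int × Int) × Bool
  | [], pairs => (pairs, false)
  | n :: ns, pairs =>
    let m := no - n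
    let p1 := pairs ++ [(n, m)]
    if (p1.length : Int) = T then (p1, true)
    else if m ≠ 0 then
      let p2 := p1 ++ [(n, -m)]
      if (p2.length : Int) = T then (p2, true)
      else aInner T no ns p2
    else aInner T no ns p1

-- termination helpers for the while-loop: the inner loop strictly grows `pairs`
theorem aInner_len_le (T no : Int) (ns : List Int) (pairs : List (Int × Int)) :
    pairs.length ≤ (aInner T no ns pairs).1.length := by
  induction ns generalizing pairs with
  | nil => simp [aInner]
  | cons n ns ih =>
    simp only [aInner]
    split_ifs with h1 h2 h3
    · simp
    · simp
    · exact le_trans (by simp) (ih _)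
    · exact le_trans (by simp) (ih _)

theorem aInner_len_lt (T no n : Int) (ns : List Int) (pairs : List (Int × Int)) :
    pairs.length < (aInner T no (n :: ns) pairs).1.length := by
  simp only [aInner]
  split_ifs with h1 h2 h3
  · simp
  · simp
  · exact lt_of_lt_of_le (by simp) (aInner_len_le T no ns _)
  · exact lt_of_lt_of_le (by simp) (aInner_len_le T no ns _)

theorem pyRange_body_cons (no : Int) (h : 0 ≤ no) :
    PySem.List.pyRange (PySem.Int.floordiv no 2) (no + 1) 1
      = PySem.Int.floordiv no 2 :: PySem.List.pyRange (PySem.Int.floordiv no 2 + 1) (no + 1) 1 := by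
  apply PySem.List.pyRange_one_cons
  rw [PySem.Int.floordiv_eq_ediv_of_pos (by omega)]
  omega

-- the `while len(pairs) < num_terms` loop (0 ≤ no is an invariant of A's loop, needed for termination)
def aOuter (T no : Int) (pairs : List (Int × Int)) (h : 0 ≤ no) : List (Int × Int) :=
  if hc : (pairs.length : Int) < T then
    aOuter T (no + 2)
      (aInner T no (PySem.List.pyRange (PySem.Int.floordiv no 2) (no + 1) 1) pairs).1
      (by omega)
  else pairs
termination_by (T - pairs.length).toNat
decreasing_by
  have hlt := aInner_len_lt T no (PySem.Int.floordiv no 2)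
      (PySem.List.pyRange (PySem.Int.floordiv no 2 + 1) (no + 1) 1) pairs
  rw [pyRange_body_cons no h]
  omega

def iso_pairs_py (num_terms : Int) : List (Int × Int) :=
  aOuter num_terms 0 [] (by omega)

-- ===== PORT B =====
def iso_pairs_py_alt (num_terms : Int) : List (Int × Int) :=
  ((PySem.List.pyRange 0 num_terms 1).foldl
    (fun st i =>
      let K := st.1
      let base := st.2.1
      let pairs := st.2.2
      let K' := if i - base = 2 * K + 1 then K + 1 else K
      let base' := if i - base = 2 * K + 1 then i else base
      let r := i - base'
      let j := PySem.Int.floordiv r 2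
      let pairs' := if PySem.Int.mod r 2 = 0 then pairs ++ [(K' + j, K' - j)]
                    else pairs ++ [(K' + j, -(K' - j))]
      (K', base', pairs'))
    ((0 : Int), (0 : Int), ([] : List (Int × Int)))).2.2

-- ===== PRECONDITION & SPEC =====
def Spec_iso_pairs_py (num_terms : Int) (out : List (Int × Int)) : Prop := out = iso_pairs_py_alt num_terms
instance (num_terms : Int) (out : List (Int × Int)) : Decidable (Spec_iso_pairs_py num_terms out) := by unfold Spec_iso_pairs_py; infer_instance

-- ===== CLAIM (what is proved, stated in full; the proofs are below) =====
def Claim_equal_iso_pairs_py : Prop := ∀ (num_terms : Int), Dom_iso_pairs_py num_terms → Spec_iso_pairs_py num_terms (iso_pairs_py num_terms)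

-- ===== LEMMAS AND PROOFS =====

-- the closed-form flat-index → pair map both loops compute a prefix of
def fZ (i : Nat) : Int × Int :=
  let K := Nat.sqrt i
  let r := i - K * K
  let j := r / 2
  if r % 2 = 0 then ((K : Int) + j, (K : Int) - j) else ((K : Int) + j, -((K : Int) - j))

theorem sqrt_group (K r : Nat) (h : r ≤ 2 * K) : Nat.sqrt (K * K + r) = K := by
  have h1 : K ≤ Nat.sqrt (K * K + r) := Nat.le_sqrt.mpr (by omega)
  have h2 : Nat.sqrt (K * K + r) < K + 1 := by
    have hring : (K + 1) * (K + 1) = K * K + 2 * K + 1 := by ring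
    exact Nat.sqrt_lt.mpr (by omega)
  omega

theorem f_even (K j : Nat) (h : j ≤ K) : fZ (K * K + 2 * j) = ((K : Int) + j, (K : Int) - j) := by
  unfold fZ
  rw [sqrt_group K (2 * j) (by omega)]
  have h1 : K * K + 2 * j - K * K = 2 * j := by omega
  have h2 : 2 * j / 2 = j := by omega
  have h3 : 2 * j % 2 = 0 := by omega
  simp [h1, h2, h3]

theorem f_odd (K j : Nat) (h : j < K) : fZ (K * K + (2 * j + 1)) = ((K : Int) + j, -((K : Int) - j)) := by
  unfold fZ
  rw [sqrt_group K (2 * j + 1) (by omega)]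
  have h1 : K * K + (2 * j + 1) - K * K = 2 * j + 1 := by omega
  have h2 : (2 * j + 1) / 2 = j := by omega
  have h3 : (2 * j + 1) % 2 = 1 := by omega
  simp [h1, h2, h3]

theorem innerLemma (T : Int) (K : Nat) : ∀ d j : Nat, K = j + d → ((K * K + 2 * j : Nat) : Int) < T →
    (aInner T (2 * (K : Int)) (PySem.List.pyRange ((K : Int) + j) (2 * (K : Int) + 1) 1)
      ((List.range (K * K + 2 * j)).map fZ)).1
    = (List.range (min T.toNat ((K + 1) * (K + 1)))).map fZ := by
  intro d
  induction d with
  | zero =>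
    intro j hKd hlt
    have hj : j = K := by omega
    subst hj
    have hsq : (j + 1) * (j + 1) = j * j + 2 * j + 1 := by ring
    rw [show (2 : Int) * (j : Int) + 1 = ((j : Int) + (j : Int)) + 1 by ring,
      PySem.List.pyRange_one_singleton]
    simp only [aInner]
    have hm0 : 2 * (j : Int) - ((j : Int) + (j : Int)) = 0 := by ring
    have hfe : fZ (j * j + 2 * j) = ((j : Int) + j, (j : Int) - j) := f_even j j le_rfl
    have hp1 : (List.range (j * j + 2 * j)).map fZ ++ [((j : Int) + (j : Int), 0)]
        = (List.range (j * j + 2 * j + 1)).map fZ := by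
      rw [List.range_succ, List.map_append, List.map_cons, List.map_nil, hfe]
      simp
    have hlen : (((List.range (j * j + 2 * j + 1)).map fZ).length : Int)
        = ((j * j + 2 * j + 1 : Nat) : Int) := by simp
    simp only [hm0, hp1, hlen]
    by_cases hT2 : (((j * j + 2 * j + 1 : Nat) : Int)) = T
    · rw [if_pos hT2]
      rw [show min T.toNat ((j + 1) * (j + 1)) = j * j + 2 * j + 1 by push_cast at hT2; omega]
    · rw [if_neg hT2, if_neg (by simp)]
      simp only [aInner]
      rw [show min T.toNat ((j + 1) * (j + 1)) = j * j + 2 * j + 1 by push_cast at hlt hT2 ⊢; omega]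
  | succ d ih =>
    intro j hKd hlt
    have hjK : j < K := by omega
    have hsq : (K + 1) * (K + 1) = K * K + 2 * K + 1 := by ring
    rw [PySem.List.pyRange_one_cons (by push_cast; omega)]
    simp only [aInner]
    have hmm : 2 * (K : Int) - ((K : Int) + (j : Int)) = (K : Int) - (j : Int) := by ring
    have hfe : fZ (K * K + 2 * j) = ((K : Int) + j, (K : Int) - j) := f_even K j (by omega)
    have hp1 : (List.range (K * K + 2 * j)).map fZ ++ [((K : Int) + (j : Int), (K : Int) - (j : Int))]
        = (List.range (K * K + 2 * j + 1)).map fZ := by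
      rw [List.range_succ, List.map_append, List.map_cons, List.map_nil, hfe]
    have hlen1 : (((List.range (K * K + 2 * j + 1)).map fZ).length : Int)
        = ((K * K + 2 * j + 1 : Nat) : Int) := by simp
    simp only [hmm, hp1, hlen1]
    by_cases hT1 : (((K * K + 2 * j + 1 : Nat) : Int)) = T
    · rw [if_pos hT1]
      rw [show min T.toNat ((K + 1) * (K + 1)) = K * K + 2 * j + 1 by push_cast at hT1; omega]
    · rw [if_neg hT1, if_pos (show (K : Int) - (j : Int) ≠ 0 by omega)]
      have hfo : fZ (K * K + (2 * j + 1)) = ((K : Int) + j, -((K : Int) - j)) := f_odd K j hjK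
      have hp2 : (List.range (K * K + 2 * j + 1)).map fZ ++ [((K : Int) + (j : Int), -((K : Int) - (j : Int)))]
          = (List.range (K * K + 2 * j + 2)).map fZ := by
        have hstep : (List.range (K * K + 2 * j + 2)).map fZ
            = (List.range (K * K + 2 * j + 1)).map fZ ++ [fZ (K * K + 2 * j + 1)] := by
          rw [show K * K + 2 * j + 2 = (K * K + 2 * j + 1) + 1 by omega, List.range_succ,
            List.map_append, List.map_cons, List.map_nil]
        rw [hstep]
        congr 1
        rw [show K * K + 2 * j + 1 = K * K + (2 * j + 1) by omega, hfo]
      have hlen2 : (((List.range (K * K + 2 * j + 2)).map fZ).length : Int)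
          = ((K * K + 2 * j + 2 : Nat) : Int) := by simp
      simp only [hp2, hlen2]
      by_cases hT2 : (((K * K + 2 * j + 2 : Nat) : Int)) = T
      · rw [if_pos hT2]
        rw [show min T.toNat ((K + 1) * (K + 1)) = K * K + 2 * j + 2 by push_cast at hT2; omega]
      · rw [if_neg hT2]
        have hres := ih (j + 1) (by omega)
          (by push_cast at hlt hT1 hT2 ⊢; omega)
        rw [show ((j + 1 : Nat) : Int) = (j : Int) + 1 by push_cast; ring,
          show K * K + 2 * (j + 1) = K * K + 2 * j + 2 by omega] at hres
        rw [show (K : Int) + (j : Int) + 1 = (K : Int) + ((j : Int) + 1) by ring]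
        exact hres

theorem outerLemma (T : Int) : ∀ N K : Nat, T.toNat - K * K ≤ N → ((K * K : Nat) : Int) < T →
    aOuter T (2 * (K : Int)) ((List.range (K * K)).map fZ) (by positivity)
      = (List.range T.toNat).map fZ := by
  intro N
  induction N with
  | zero => intro K h1 h2; exfalso; push_cast at h2; omega
  | succ N ih =>
    intro K h1 h2
    have hsq : (K + 1) * (K + 1) = K * K + 2 * K + 1 := by ring
    rw [aOuter, dif_pos (by simpa using h2)]
    have hfd : PySem.Int.floordiv (2 * (K : Int)) 2 = (K : Int) := by
      rw [PySem.Int.floordiv_eq_ediv_of_pos (by omega)]; omega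
    have hinner := innerLemma T K K 0 (by omega) (by simpa using h2)
    simp only [Nat.cast_zero, add_zero, mul_zero] at hinner
    rw [hfd, hinner]
    by_cases hend : T.toNat ≤ (K + 1) * (K + 1)
    · rw [show min T.toNat ((K + 1) * (K + 1)) = T.toNat by omega]
      rw [aOuter, dif_neg (by simp only [List.length_map, List.length_range]; omega)]
    · rw [show min T.toNat ((K + 1) * (K + 1)) = (K + 1) * (K + 1) by omega]
      convert ih (K + 1) (by omega) (by omega) using 2

def pvG : Nat → Nat
  | 0 => 0
  | n + 1 => Nat.sqrt n

theorem pvG_bounds (n : Nat) : pvG n * pvG n ≤ n ∧ n ≤ (pvG n + 1) * (pvG n + 1) := by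
  cases n with
  | zero => simp [pvG]
  | succ m =>
    simp only [pvG]
    have h1 := Nat.sqrt_le' m
    have h2 := Nat.lt_succ_sqrt' m
    have e1 : Nat.sqrt m ^ 2 = Nat.sqrt m * Nat.sqrt m := by ring
    have e2 : (Nat.sqrt m + 1) ^ 2 = (Nat.sqrt m + 1) * (Nat.sqrt m + 1) := by ring
    simp only [e1] at h1
    simp only [Nat.succ_eq_add_one, e2] at h2
    omega

theorem bLemma (N : Nat) :
    (((List.range N).map (fun k : Nat => (k : Int))).foldl
      (fun st i =>
        let K := st.1
        let base := st.2.1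
        let pairs := st.2.2
        let K' := if i - base = 2 * K + 1 then K + 1 else K
        let base' := if i - base = 2 * K + 1 then i else base
        let r := i - base'
        let j := PySem.Int.floordiv r 2
        let pairs' := if PySem.Int.mod r 2 = 0 then pairs ++ [(K' + j, K' - j)]
                      else pairs ++ [(K' + j, -(K' - j))]
        (K', base', pairs'))
      ((0 : Int), (0 : Int), ([] : List (Int × Int))))
    = ((pvG N : Int), ((pvG N * pvG N : Nat) : Int), (List.range N).map fZ) := by
  induction N with
  | zero => simp [pvG]
  | succ n ih =>
    rw [List.range_succ, List.map_append, List.foldl_append, ih]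
    simp only [List.map_cons, List.map_nil, List.foldl_cons, List.foldl_nil]
    have hb := pvG_bounds n
    set K := pvG n with hK
    have hsq : (K + 1) * (K + 1) = K * K + 2 * K + 1 := by ring
    by_cases hc : ((n : Int)) - ((K * K : Nat) : Int) = 2 * (K : Int) + 1
    · -- n starts the next group: n = (K+1)^2
      have hn : n = (K + 1) * (K + 1) := by push_cast at hc; omega
      have hg : pvG (n + 1) = K + 1 := by
        show Nat.sqrt n = K + 1
        rw [hn, show (K + 1) * (K + 1) = (K + 1) ^ 2 by ring]
        exact Nat.sqrt_eq' (K + 1)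
      have hf : fZ n = ((K : Int) + 1 + 0, (K : Int) + 1 - 0) := by
        have := f_even (K + 1) 0 (by omega)
        rw [hn]; simpa using this
      have h0 : ((n : Int)) - ((n : Int)) = 0 := by omega
      have hd : PySem.Int.floordiv 0 2 = 0 := by decide
      have hm : PySem.Int.mod 0 2 = 0 := by decide
      simp only [if_pos hc, h0, hd, hm, hg, hf,
        List.map_append, List.map_cons, List.map_nil, Prod.mk.injEq]
      refine ⟨by push_cast; ring, by rw [hn], by simp⟩
    · -- n stays inside group K
      have hlt : n < (K + 1) * (K + 1) := by
        rcases Nat.lt_or_ge n ((K + 1) * (K + 1)) with h | h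
        · exact h
        · exfalso; apply hc; push_cast; omega
      have hnr : n = K * K + (n - K * K) := by omega
      set r := n - K * K with hrdef
      have hrle : r ≤ 2 * K := by omega
      have hg : pvG (n + 1) = K := by
        show Nat.sqrt n = K
        conv_lhs => rw [hnr]
        exact sqrt_group K r hrle
      have hcast : ((n : Int)) - ((K * K : Nat) : Int) = ((r : Nat) : Int) := by push_cast; omega
      have hd : PySem.Int.floordiv ((r : Nat) : Int) 2 = ((r / 2 : Nat) : Int) := by
        exact_mod_cast PySem.Int.floordiv_natCast r 2
      have hm : PySem.Int.mod ((r : Nat) : Int) 2 = ((r % 2 : Nat) : Int) := by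
        exact_mod_cast PySem.Int.mod_natCast r 2
      simp only [hcast] at hc ⊢
      simp only [if_neg hc, hcast, hd, hm, hg, List.map_append,
        List.map_cons, List.map_nil, Prod.mk.injEq]
      by_cases hp : r % 2 = 0
      · have hf : fZ n = ((K : Int) + (r / 2 : Nat), (K : Int) - (r / 2 : Nat)) := by
          have := f_even K (r / 2) (by omega)
          rw [hnr, show K * K + r = K * K + 2 * (r / 2) by omega]
          simpa using this
        simp [hp, hf]
      · have hf : fZ n = ((K : Int) + (r / 2 : Nat), -((K : Int) - (r / 2 : Nat))) := by
          have := f_odd K (r / 2) (by omega)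
          rw [hnr, show K * K + r = K * K + (2 * (r / 2) + 1) by omega]
          simpa using this
        simp only [hf, List.range_succ, List.map_append, List.map_cons, List.map_nil,
          Prod.mk.injEq]
        simp
        intro h
        exact absurd (by exact_mod_cast h : 2 ∣ r) (by omega)

-- ===== VERDICT (by name: the statement is the Claim_ definition above) =====
theorem iso_pairs_py_spec : Claim_equal_iso_pairs_py := by
  intro T _
  unfold Spec_iso_pairs_py iso_pairs_py iso_pairs_py_alt
  by_cases hT : T ≤ 0
  · rw [aOuter]
    simp [show ¬ ((0:Int) < T) by omega, PySem.List.pyRange_one_eq_nil hT]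
  · have hA := outerLemma T T.toNat 0 (by omega) (by push_cast; omega)
    simp only [Nat.cast_zero, mul_zero, Nat.zero_mul, List.range_zero, List.map_nil] at hA
    rw [hA]
    rw [PySem.List.pyRange_one 0 T]
    simp only [zero_add, sub_zero]
    exact (congrArg (fun p => p.2.2) (bLemma T.toNat)).symm
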